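-- pv_equiv track=rewrite | github.com/BlueStorminator/puzzle_tools | wordsnips.py | word_value_calc
-- ===== SOURCE A (Python) =====
-- def word_value_calc(raw_word):
--     """calculate the word value of a word
--     based on A=1 to Z=26 and the reverse"""
--     # convert to uppercase
--     upper_word = raw_word.upper()
--     # remove non-alpha characters and calculate value sum
--     final_word = ''
--     value = 0
--     reverse_value = 0
--     for ch in upper_word:
--         if "A" <= ch <= "Z":
--             final_word += ch
--             value += ord(ch) - 64
--             reverse_value += 27 - (ord(ch)-64)
--     return final_word, value, reverse_value
-- ===== SOURCE B (Python) =====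
-- ALPHABET = 'ABCDEFGHIJKLMNOPQRSTUVWXYZ'
--
-- def word_value_calc(raw_word):
--     """calculate the word value of a word
--     based on A=1 to Z=26 and the reverse"""
--     upper_word = raw_word.upper()
--     final_word = ''.join(ch for ch in upper_word if ch in ALPHABET)
--     counts = [upper_word.count(ch) for ch in ALPHABET]
--     value = sum(n * (i + 1) for i, n in enumerate(counts))
--     reverse_value = sum(n * (26 - i) for i, n in enumerate(counts))
--     return final_word, value, reverse_value
-- ===== Notes on version B (the rewrite author's own statement) =====
-- stated objective: faster
-- what changed: B replaces A's per-character accumulation with a letter-frequency histogram: it counts each of the 26 alphabet letters once and computes value and reverse_value as weighted sums over the histogram (iterating the alphabet, not the word), building final_word by a membership filter with join instead of quadratic string +=.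
import Mathlib
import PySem

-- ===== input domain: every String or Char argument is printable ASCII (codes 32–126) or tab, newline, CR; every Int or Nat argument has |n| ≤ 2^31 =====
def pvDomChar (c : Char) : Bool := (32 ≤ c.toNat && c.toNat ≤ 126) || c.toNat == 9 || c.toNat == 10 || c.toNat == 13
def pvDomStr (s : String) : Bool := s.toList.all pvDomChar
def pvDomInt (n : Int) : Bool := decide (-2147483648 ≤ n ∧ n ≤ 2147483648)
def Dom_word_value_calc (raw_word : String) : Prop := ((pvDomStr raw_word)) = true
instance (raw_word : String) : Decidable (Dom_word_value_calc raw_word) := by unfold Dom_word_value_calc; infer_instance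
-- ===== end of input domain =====

-- B replaces A's per-character accumulator loop by a letter-frequency histogram: it counts each alphabet letter once and computes both values as weighted sums over the histogram (iterating the alphabet, not the word).


-- ===== PORT A =====
-- the loop over upper_word maintaining (final_word, value, reverse_value);
-- "A" <= ch <= "Z" on single-char strings is codepoint comparison = Char ≤ (exact)
def word_value_calc (raw_word : String) : String × Int × Int :=
  let upper_word := PySem.Str.upper raw_word
  let st := upper_word.toList.foldl
    (fun (st : List Char × Int × Int) ch =>
      if 'A' ≤ ch ∧ ch ≤ 'Z' then
        (st.1 ++ [ch], st.2.1 + ((ch.toNat : Int) - 64), st.2.2 + (27 - ((ch.toNat : Int) - 64)))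
      else st)
    ([], 0, 0)
  (String.ofList st.1, st.2.1, st.2.2)

-- ===== PORT B =====
-- the module constant ALPHABET
def wvcAlphabet : List Char :=
  ['A','B','C','D','E','F','G','H','I','J','K','L','M','N','O','P','Q','R','S','T','U','V','W','X','Y','Z']

-- 'ch in ALPHABET' on a single char = list membership (exact);
-- upper_word.count(ch) with a single-char needle = occurrence count of that char (exact)
def word_value_calc_alt (raw_word : String) : String × Int × Int :=
  let upper_word := (PySem.Str.upper raw_word).toList
  let final_word := upper_word.filter (fun ch => decide (ch ∈ wvcAlphabet))
  let counts : List Int := wvcAlphabet.map (fun ch => ((upper_word.count ch : Int)))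
  let value := ((PySem.List.enumerate counts).map (fun p => p.2 * (p.1 + 1))).sum
  let reverse_value := ((PySem.List.enumerate counts).map (fun p => p.2 * (26 - p.1))).sum
  (String.ofList final_word, value, reverse_value)

-- ===== PRECONDITION & SPEC =====
def Spec_word_value_calc (raw_word : String) (out : String × Int × Int) : Prop := out = word_value_calc_alt raw_word
instance (raw_word : String) (out : String × Int × Int) : Decidable (Spec_word_value_calc raw_word out) := by unfold Spec_word_value_calc; infer_instance

-- ===== CLAIM (what is proved, stated in full; the proofs are below) =====
def Claim_equal_word_value_calc : Prop := ∀ (raw_word : String), Dom_word_value_calc raw_word → Spec_word_value_calc raw_word (word_value_calc raw_word)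

-- ===== LEMMAS AND PROOFS =====

theorem char_le_iff (a c : Char) : a ≤ c ↔ a.toNat ≤ c.toNat := by
  rw [Char.le_def, UInt32.le_iff_toNat_le]; rfl

theorem mem_alpha_iff (c : Char) : c ∈ wvcAlphabet ↔ ('A' ≤ c ∧ c ≤ 'Z') := by
  constructor
  · intro h
    rw [char_le_iff, char_le_iff]
    fin_cases h <;> exact ⟨by decide, by decide⟩
  · intro ⟨h1, h2⟩
    rw [char_le_iff] at h1 h2
    obtain ⟨n, hn1, hn2, rfl⟩ : ∃ n, 65 ≤ n ∧ n ≤ 90 ∧ c = Char.ofNat n :=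
      ⟨c.toNat, h1, h2, (Char.ofNat_toNat c).symm⟩
    interval_cases n <;> decide

-- A's loop, characterised: the accumulators hold filter / letter-value sum / reverse-value sum
theorem wvc_loopA (cs : List Char) : ∀ (acc : List Char) (v r : Int),
    cs.foldl
      (fun (st : List Char × Int × Int) ch =>
        if 'A' ≤ ch ∧ ch ≤ 'Z' then
          (st.1 ++ [ch], st.2.1 + ((ch.toNat : Int) - 64), st.2.2 + (27 - ((ch.toNat : Int) - 64)))
        else st)
      (acc, v, r)
    = (acc ++ cs.filter (fun ch => decide ('A' ≤ ch ∧ ch ≤ 'Z')),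
       v + ((cs.filter (fun ch => decide ('A' ≤ ch ∧ ch ≤ 'Z'))).map (fun ch => ((ch.toNat : Int) - 64))).sum,
       r + ((cs.filter (fun ch => decide ('A' ≤ ch ∧ ch ≤ 'Z'))).map (fun ch => (27 - ((ch.toNat : Int) - 64)))).sum) := by
  induction cs with
  | nil => intro acc v r; simp
  | cons c cs ih =>
    intro acc v r
    by_cases h : 'A' ≤ c ∧ c ≤ 'Z'
    · simp [List.foldl, h, ih]
      constructor
      · ring
      · ring
    · simp [List.foldl, h, ih]

-- adding one character to the word bumps the histogram-weighted sum by its weight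
theorem wvc_delta (w : Int → Int) (c : Char) (l : List Char) :
    ((PySem.List.enumerate (wvcAlphabet.map (fun ch => (((c :: l).count ch : Int))))).map
        (fun p => p.2 * w p.1)).sum
      = ((PySem.List.enumerate (wvcAlphabet.map (fun ch => ((l.count ch : Int))))).map
          (fun p => p.2 * w p.1)).sum
        + (if 'A' ≤ c ∧ c ≤ 'Z' then w ((c.toNat : Int) - 65) else 0) := by
  by_cases h : 'A' ≤ c ∧ c ≤ 'Z'
  · obtain ⟨h1, h2⟩ := h
    rw [char_le_iff] at h1 h2
    obtain ⟨n, hn1, hn2, rfl⟩ : ∃ n, 65 ≤ n ∧ n ≤ 90 ∧ c = Char.ofNat n :=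
      ⟨c.toNat, h1, h2, (Char.ofNat_toNat c).symm⟩
    interval_cases n <;>
      · simp [wvcAlphabet, List.count_cons, PySem.List.enumerate]
        ring
  · have hcnt : wvcAlphabet.map (fun ch => (((c :: l).count ch : Int)))
        = wvcAlphabet.map (fun ch => ((l.count ch : Int))) := by
      apply List.map_congr_left
      intro a ha
      rw [List.count_cons]
      have hne : c ≠ a := by
        intro e
        apply h
        rw [e, char_le_iff, char_le_iff]
        fin_cases ha <;> exact ⟨by decide, by decide⟩
      simp [hne]
    rw [hcnt, if_neg h, add_zero]

-- the histogram-weighted sum IS the per-letter sum over the filtered word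
theorem wvc_sum (w : Int → Int) (g : Char → Int)
    (hg : ∀ c : Char, 'A' ≤ c ∧ c ≤ 'Z' → w ((c.toNat : Int) - 65) = g c) :
    ∀ l : List Char,
      ((PySem.List.enumerate (wvcAlphabet.map (fun ch => ((l.count ch : Int))))).map
        (fun p => p.2 * w p.1)).sum
      = ((l.filter (fun c => decide ('A' ≤ c ∧ c ≤ 'Z'))).map g).sum := by
  intro l
  induction l with
  | nil => simp [wvcAlphabet, PySem.List.enumerate]
  | cons c l ih =>
    rw [wvc_delta w c l, ih]
    by_cases h : 'A' ≤ c ∧ c ≤ 'Z'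
    · rw [if_pos h, hg c h]
      simp [h]
      ring
    · rw [if_neg h, add_zero]
      simp [h]

-- ===== VERDICT (by name: the statement is the Claim_ definition above) =====
theorem word_value_calc_spec : Claim_equal_word_value_calc := by
  intro raw_word _
  unfold Spec_word_value_calc word_value_calc word_value_calc_alt
  simp only [wvc_loopA]
  refine congrArg₂ Prod.mk ?_ (congrArg₂ Prod.mk ?_ ?_)
  · refine congrArg String.ofList ?_
    simp only [List.nil_append]
    exact (List.filter_congr (fun x _ => by simp [mem_alpha_iff])).symm
  · rw [wvc_sum (fun i => i + 1) (fun c => ((c.toNat : Int) - 64)) (fun c _ => by ring)]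
    simp
  · rw [wvc_sum (fun i => 26 - i) (fun c => (27 - ((c.toNat : Int) - 64))) (fun c _ => by ring)]
    simp
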